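-- pv_equiv track=rewrite | github.com/vertexpipeline/HoffmanTranscoder | hoffman.py | getHemmingTables
-- ===== SOURCE A (Python) =====
-- def getHemmingTables(n, c):
--     degress = [2**x for x in range(0,n)]
--     table = []
--     for i in degress:
--         cur = [0]*c
--         step = i-1
--         j = 0
--         while j<c:
--             if step == 0:
--                 for k in range(0,i):
--                     if j+k<c:
--                      cur[j+k] = 1
--                 j+=i-1
--                 step = i
--             else:
--                 step-=1
--             j+=1
--         table.append(cur)
--     return (degress, table)
-- ===== SOURCE B (Python) =====
-- def getHemmingTables(n, c):
--     degress = [2 ** x for x in range(n)]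
--     table = [[1 if (j + 1) & i else 0 for j in range(c)] for i in degress]
--     return (degress, table)
-- ===== Notes on version B (the rewrite author's own statement) =====
-- stated objective: simpler
-- what changed: The stateful step-counter/block-painting while-loop over a mutable row is replaced by a closed-form per-position bit test: position j is covered by parity bit i=2^x iff (j+1)&i is nonzero.
import Mathlib
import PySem

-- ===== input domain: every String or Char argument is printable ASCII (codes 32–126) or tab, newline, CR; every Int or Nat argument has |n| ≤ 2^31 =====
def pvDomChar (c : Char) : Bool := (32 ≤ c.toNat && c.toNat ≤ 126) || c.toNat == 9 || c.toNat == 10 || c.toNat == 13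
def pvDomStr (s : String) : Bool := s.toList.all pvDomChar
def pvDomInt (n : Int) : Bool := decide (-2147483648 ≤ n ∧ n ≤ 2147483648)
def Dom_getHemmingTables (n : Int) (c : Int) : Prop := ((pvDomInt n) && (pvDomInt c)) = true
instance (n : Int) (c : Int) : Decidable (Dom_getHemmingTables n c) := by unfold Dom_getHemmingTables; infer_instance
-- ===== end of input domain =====

-- B replaces A's stateful step-counter block-painting while-loop by a per-position
-- closed-form bit test ((j+1) & i); same asymptotic cost, simpler code.

-- ===== PORT A =====
-- inner 'for k in range(0,i): if j+k<c: cur[j+k] = 1' (j, k ≥ 0 here, and the guard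
-- keeps the index in range, so pySetD is exact)
def pvPaint (c : Int) (cur : List Int) (j i : Int) : List Int :=
  (PySem.List.pyRange 0 i 1).foldl
    (fun acc k => if j + k < c then PySem.List.pySetD acc (j + k) 1 else acc) cur

-- the 'while j < c' loop; fuel bounds the iteration count (j strictly increases each
-- iteration since i ≥ 1, so c.toNat fuel is always enough — a totality guard only)
def pvLoopA (c i : Int) (cur : List Int) (step j : Int) (fuel : Nat) : List Int :=
  match fuel with
  | 0 => cur
  | fuel + 1 =>
      if j < c then
        if step = 0 then
          pvLoopA c i (pvPaint c cur j i) i (j + (i - 1) + 1) fuel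
        else
          pvLoopA c i cur (step - 1) (j + 1) fuel
      else cur

def getHemmingTables (n : Int) (c : Int) : List Int × List (List Int) :=
  let degress := (PySem.List.pyRange 0 n 1).map (fun x => (2 : Int) ^ x.toNat)
  let table := degress.foldl
    (fun tb i => tb ++ [pvLoopA c i (List.replicate c.toNat 0) (i - 1) 0 c.toNat])
    ([] : List (List Int))
  (degress, table)

-- ===== PORT B =====
def getHemmingTables_alt (n : Int) (c : Int) : List Int × List (List Int) :=
  let degress := (PySem.List.pyRange 0 n 1).map (fun x => (2 : Int) ^ x.toNat)
  let table := degress.map (fun i =>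
    (PySem.List.pyRange 0 c 1).map (fun j =>
      if PySem.Int.band (j + 1) i ≠ 0 then (1 : Int) else 0))
  (degress, table)

-- ===== PRECONDITION & SPEC =====
def Spec_getHemmingTables (n : Int) (c : Int) (out : List Int × List (List Int)) : Prop := out = getHemmingTables_alt n c
instance (n : Int) (c : Int) (out : List Int × List (List Int)) : Decidable (Spec_getHemmingTables n c out) := by unfold Spec_getHemmingTables; infer_instance

-- ===== CLAIM (what is proved, stated in full; the proofs are below) =====
def Claim_equal_getHemmingTables : Prop := ∀ (n : Int) (c : Int), Dom_getHemmingTables n c → Spec_getHemmingTables n c (getHemmingTables n c)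

-- ===== LEMMAS AND PROOFS =====

-- the intended value of row e at 0-based position p
def pvRow (e : Nat) (p : Nat) : Int := if (p + 1) &&& 2 ^ e ≠ 0 then 1 else 0

lemma pvRow_iff (e x : Nat) : (x &&& 2 ^ e ≠ 0) ↔ 2 ^ e ≤ x % 2 ^ (e + 1) := by
  rw [Nat.and_two_pow, Nat.testBit_eq_decide_div_mod_eq]
  have h1 : x % (2 ^ e * 2) = x % 2 ^ e + 2 ^ e * (x / 2 ^ e % 2) := Nat.mod_mul
  have h2 : x % 2 ^ e < 2 ^ e := Nat.mod_lt _ (Nat.two_pow_pos e)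
  have h3 : x / 2 ^ e % 2 = 0 ∨ x / 2 ^ e % 2 = 1 := by omega
  have hp : (2 : Nat) ^ (e + 1) = 2 ^ e * 2 := by ring
  rw [hp, h1]
  rcases h3 with h | h
  · simp [h]
    omega
  · simp [h]
    try omega

-- a painted position: j ≡ 2^e - 1 (mod 2^(e+1)), 0 ≤ k < 2^e  ⇒  bit set at j + k
lemma pvRow_paint (e j k : Nat) (hj : j % 2 ^ (e + 1) = 2 ^ e - 1) (hk : k < 2 ^ e) :
    pvRow e (j + k) = 1 := by
  have hpos : 0 < 2 ^ e := Nat.two_pow_pos e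
  have hdec := Nat.div_add_mod j (2 ^ (e + 1))
  unfold pvRow
  rw [if_pos]
  apply (pvRow_iff e (j + k + 1)).mpr
  have heq : j + k + 1 = (2 ^ e + k) + 2 ^ (e + 1) * (j / 2 ^ (e + 1)) := by
    rw [hj] at hdec; omega
  rw [heq, Nat.add_mul_mod_self_left, Nat.mod_eq_of_lt (by
    have : (2 : Nat) ^ (e + 1) = 2 ^ e * 2 := by ring
    omega)]
  omega

-- a skipped position: j + s ≡ 2^e - 1 (mod 2^(e+1)), 1 ≤ s ≤ 2^e  ⇒  bit clear at j
lemma pvRow_skip (e j s : Nat) (hmod : (j + s) % 2 ^ (e + 1) = 2 ^ e - 1)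
    (hs1 : 1 ≤ s) (hs2 : s ≤ 2 ^ e) : pvRow e j = 0 := by
  have hpos : 0 < 2 ^ e := Nat.two_pow_pos e
  have hdec := Nat.div_add_mod (j + s) (2 ^ (e + 1))
  unfold pvRow
  rw [if_neg]
  intro h
  have h' := (pvRow_iff e (j + 1)).mp h
  have hlt : (2 : Nat) ^ (e + 1) = 2 ^ e * 2 := by ring
  have heq : j + 1 = (2 ^ e - s) + 2 ^ (e + 1) * ((j + s) / 2 ^ (e + 1)) := by
    rw [hmod] at hdec; omega
  rw [heq, Nat.add_mul_mod_self_left, Nat.mod_eq_of_lt (by omega)] at h'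
  omega

-- the inner paint loop fills [j, j + 2^e) ∩ [0, c) with ones
lemma pvPaint_range (c : Int) (j : Nat) (m : Nat) (f : Nat → Int) :
    pvPaint c ((List.range c.toNat).map f) (j : Int) (m : Nat)
      = (List.range c.toNat).map (fun p => if j ≤ p ∧ p < j + m then 1 else f p) := by
  induction m with
  | zero =>
      unfold pvPaint
      rw [PySem.List.pyRange_one_eq_nil (by simp)]
      simp only [List.foldl_nil]
      refine (List.map_congr_left fun p _ => ?_).symm
      rw [if_neg (by omega)]
  | succ m ih =>
      have hsplit : PySem.List.pyRange 0 ((m : Int) + 1) 1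
          = PySem.List.pyRange 0 (m : Int) 1 ++ [(m : Int)] :=
        PySem.List.pyRange_one_succ_right (by positivity)
      have hc : ((m : Int) + 1) = ((m + 1 : Nat) : Int) := by push_cast; ring
      unfold pvPaint
      rw [← hc, hsplit, List.foldl_append]
      have ihp := ih
      unfold pvPaint at ihp
      rw [ihp]
      simp only [List.foldl_cons, List.foldl_nil]
      by_cases hin : (j : Int) + (m : Int) < c
      · rw [if_pos hin]
        have hjm : (j : Int) + (m : Int) = ((j + m : Nat) : Int) := by push_cast; ring
        rw [hjm, PySem.List.pySetD_natCast]
        apply List.ext_getElem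
        · simp
        · intro p h1 h2
          have hp : p < c.toNat := by simpa using h2
          have hjmc : j + m < c.toNat := by omega
          simp only [List.getElem_set, List.getElem_map, List.getElem_range]
          split_ifs <;> omega
      · rw [if_neg hin]
        apply List.map_congr_left
        intro p hp
        have hp' : p < c.toNat := List.mem_range.mp hp
        have : (p : Int) < c := by
          have : (c.toNat : Int) ≤ c ∨ c < 0 := by omega
          rcases this with h | h
          · omega
          · omega
        split_ifs <;> omega

-- loop invariant: at a loop head with position j, countdown s (s ≤ 2^e,
-- (j+s) % 2^(e+1) = 2^e - 1), positions < j already hold their final value and the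
-- rest are 0; the loop finishes the row
lemma pvLoopA_inv (e : Nat) (c : Int) (fuel : Nat) :
    ∀ (j s : Nat), s ≤ 2 ^ e → (j + s) % 2 ^ (e + 1) = 2 ^ e - 1 →
    c.toNat ≤ j + fuel →
    pvLoopA c ((2 : Int) ^ e) ((List.range c.toNat).map (fun p => if p < j then pvRow e p else 0))
      (s : Int) (j : Int) fuel
      = (List.range c.toNat).map (pvRow e) := by
  induction fuel with
  | zero =>
      intro j s _ _ hfuel
      simp only [pvLoopA]
      exact List.map_congr_left (fun p hp => by
        have := List.mem_range.mp hp; rw [if_pos (by omega)])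
  | succ fuel ih =>
      intro j s hs hmod hfuel
      have hpos : 0 < 2 ^ e := Nat.two_pow_pos e
      simp only [pvLoopA]
      by_cases hjc : (j : Int) < c
      · rw [if_pos hjc]
        have hjc' : j < c.toNat := by omega
        by_cases hs0 : s = 0
        · subst hs0
          rw [if_pos (by norm_num)]
          have hmod' : j % 2 ^ (e + 1) = 2 ^ e - 1 := by simpa using hmod
          have hpow : (2 : Int) ^ e = ((2 ^ e : Nat) : Int) := by push_cast; ring
          rw [hpow, pvPaint_range c j (2 ^ e) _]
          have hrw : (List.range c.toNat).map
              (fun p => if j ≤ p ∧ p < j + 2 ^ e then 1 else if p < j then pvRow e p else 0)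
              = (List.range c.toNat).map (fun p => if p < j + 2 ^ e then pvRow e p else 0) := by
            apply List.map_congr_left
            intro p _
            by_cases h1 : j ≤ p ∧ p < j + 2 ^ e
            · rw [if_pos h1, if_pos h1.2]
              have : p = j + (p - j) := by omega
              rw [this, pvRow_paint e j (p - j) hmod' (by omega)]
            · split_ifs with h2 h3 <;> try rfl
              · omega
              · omega
          rw [hrw]
          rw [show ((j : Int) + ((((2 ^ e : Nat)) : Int) - 1) + 1) = ((j + 2 ^ e : Nat) : Int) by
            push_cast; try ring]
          have := ih (j + 2 ^ e) (2 ^ e) (le_refl _)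
            (by
              have : j + 2 ^ e + 2 ^ e = (j + 2 ^ (e + 1)) := by ring
              rw [this, Nat.add_mod_right]; exact hmod')
            (by omega)
          simpa using this
        · rw [if_neg (by
            intro h
            have : s = 0 := by omega
            exact hs0 this)]
          have h1 : ((s : Int) - 1) = ((s - 1 : Nat) : Int) := by omega
          have h2 : ((j : Int) + 1) = ((j + 1 : Nat) : Int) := by push_cast; ring
          rw [h1, h2]
          have hrow0 : pvRow e j = 0 := pvRow_skip e j s hmod (by omega) hs
          have hrw : (List.range c.toNat).map (fun p => if p < j then pvRow e p else 0)
              = (List.range c.toNat).map (fun p => if p < j + 1 then pvRow e p else 0) := by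
            apply List.map_congr_left
            intro p _
            split_ifs with ha hb <;> try rfl
            · omega
            · have : p = j := by omega
              rw [this, hrow0]
          rw [hrw]
          exact ih (j + 1) (s - 1) (by omega) (by
            have : j + 1 + (s - 1) = j + s := by omega
            rw [this]; exact hmod) (by omega)
      · rw [if_neg hjc]
        exact List.map_congr_left (fun p hp => by
          have hp' := List.mem_range.mp hp
          rw [if_pos (by omega)])

-- one full row of A equals one full row of B
lemma pvLoopA_row (e : Nat) (c : Int) :
    pvLoopA c ((2 : Int) ^ e) (List.replicate c.toNat 0) ((2 : Int) ^ e - 1) 0 c.toNat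
      = (PySem.List.pyRange 0 c 1).map (fun j =>
          if PySem.Int.band (j + 1) ((2 : Int) ^ e) ≠ 0 then (1 : Int) else 0) := by
  have hpos : 0 < 2 ^ e := Nat.two_pow_pos e
  have hrepl : (List.replicate c.toNat (0 : Int))
      = (List.range c.toNat).map (fun p => if p < 0 then pvRow e p else 0) := by
    simp
  have hstep : ((2 : Int) ^ e - 1) = ((2 ^ e - 1 : Nat) : Int) := by
    rw [Nat.cast_sub hpos]; push_cast; ring
  have hzero : (0 : Int) = ((0 : Nat) : Int) := rfl
  have hB : (PySem.List.pyRange 0 c 1).map (fun j =>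
        if PySem.Int.band (j + 1) ((2 : Int) ^ e) ≠ 0 then (1 : Int) else 0)
      = (List.range c.toNat).map (pvRow e) := by
    rw [PySem.List.pyRange_one, List.map_map, show c - (0 : Int) = c by ring]
    apply List.map_congr_left
    intro p _
    simp only [Function.comp]
    have h1 : (0 : Int) + (p : Int) + 1 = ((p + 1 : Nat) : Int) := by push_cast; ring
    have h2 : (2 : Int) ^ e = ((2 ^ e : Nat) : Int) := by push_cast; ring
    rw [h1, h2, PySem.Int.band_natCast]
    unfold pvRow
    split_ifs with ha hb <;> omega
  rw [hB, hrepl, hstep, hzero]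
  exact pvLoopA_inv e c c.toNat 0 (2 ^ e - 1) (by omega)
    (by
      simp only [Nat.zero_add]
      apply Nat.mod_eq_of_lt
      have : (2:Nat) ^ (e+1) = 2 ^ e * 2 := by ring
      omega)
    (by omega)

-- foldl-append builds the map
lemma pvFoldl_append {α β : Type} (l : List α) (f : α → β) (acc : List β) :
    l.foldl (fun tb i => tb ++ [f i]) acc = acc ++ l.map f := by
  induction l generalizing acc with
  | nil => simp
  | cons x xs ih => simp [ih]

-- ===== VERDICT (by name: the statement is the Claim_ definition above) =====
theorem getHemmingTables_spec : Claim_equal_getHemmingTables := by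
  intro n c _
  unfold Spec_getHemmingTables getHemmingTables getHemmingTables_alt
  simp only
  rw [pvFoldl_append, List.nil_append, List.map_map, List.map_map]
  congr 1
  apply List.map_congr_left
  intro x _
  simp only [Function.comp]
  exact pvLoopA_row x.toNat c
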